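-- pv_equiv track=rewrite | github.com/davisonrails/Python_scripting_misc | english_braille.py | whole_word_contractions
-- ===== SOURCE A (Python) =====
-- def whole_word_contractions(text):
--     '''(str) -> str
--     Process English text so that the full-word contractions are changed
--     to the appropriate French accented letter, so that when this is run
--     through the French Braille translator we get English Braille.
--
--     If the full-word contraction appears within a word,
--     contract it. (e.g. 'and' in 'sand')
--
--     Provided to students. You should not edit this function.
--
--     >>> whole_word_contractions('with')
--     'ù'
--     >>> whole_word_contractions('for the cat with the purr and the meow')
--     'é à cat ù à purr ç à meow'
--     >>> whole_word_contractions('With')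
--     'Ù'
--     >>> whole_word_contractions('WITH')
--     'Ù'
--     >>> whole_word_contractions('wiTH')
--     'wiTH'
--     >>> whole_word_contractions('FOR thE Cat WITh THE purr And The meow')
--     'É thE Cat WITh À purr Ç À meow'
--     >>> whole_word_contractions('aforewith parenthetical sand')
--     'aéeù parenàtical sç'
--     >>> whole_word_contractions('wither')
--     'ùer'
--     '''
--     # putting 'with' first so wither becomes with-er not wi-the-r
--     words = ['with', 'and', 'for', 'the']
--     fr_equivs = ['ù', 'ç', 'é', 'à', ]
--     # lower case
--     for i, w in enumerate(words):
--         text = text.replace(w, fr_equivs[i])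
--     for i, w in enumerate(words):
--         text = text.replace(w.upper(), fr_equivs[i].upper())
--     for i, w in enumerate(words):
--         text = text.replace(w.capitalize(), fr_equivs[i].upper())
--     return text
-- ===== SOURCE B (Python) =====
-- def _scan(text, table):
--     out = []
--     i = 0
--     n = len(text)
--     while i < n:
--         for tok, rep in table:
--             if text.startswith(tok, i):
--                 out.append(rep)
--                 i += len(tok)
--                 break
--         else:
--             out.append(text[i])
--             i += 1
--     return ''.join(out)
--
--
-- def whole_word_contractions(text):
--     text = _scan(text, [('with', 'ù'), ('and', 'ç'), ('for', 'é'), ('the', 'à')])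
--     text = _scan(text, [('WITH', 'Ù'), ('AND', 'Ç'), ('FOR', 'É'), ('THE', 'À')])
--     return _scan(text, [('With', 'Ù'), ('And', 'Ç'), ('For', 'É'), ('The', 'À')])
-- ===== Notes on version B (the rewrite author's own statement) =====
-- stated objective: alternative
-- what changed: A makes twelve whole-string str.replace passes (one per token); B builds one token table per case family and makes three single left-to-right scans, matching the table at each position and advancing by the matched token's length.
import Mathlib
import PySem

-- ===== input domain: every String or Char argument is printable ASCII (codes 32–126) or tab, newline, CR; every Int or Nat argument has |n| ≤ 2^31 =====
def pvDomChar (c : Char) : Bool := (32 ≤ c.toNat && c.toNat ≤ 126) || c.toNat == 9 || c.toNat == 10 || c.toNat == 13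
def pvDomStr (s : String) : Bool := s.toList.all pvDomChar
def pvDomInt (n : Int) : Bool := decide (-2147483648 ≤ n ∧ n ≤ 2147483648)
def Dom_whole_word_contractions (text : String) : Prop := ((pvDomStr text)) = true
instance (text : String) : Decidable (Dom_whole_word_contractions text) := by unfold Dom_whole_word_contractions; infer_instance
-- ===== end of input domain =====

-- B replaces A's twelve whole-string str.replace passes by three single left-to-right
-- table-driven scans (one per case family); objective: alternative (same result, one
-- traversal per family instead of four).

-- ===== PORT A =====
-- 'with'.upper() / 'ù'.upper() / 'with'.capitalize() … are evaluated on A's literal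
-- constants and written out by hand (exact per CPython: 'ù'.upper() = 'Ù' etc.;
-- PySem.Str.upper covers ASCII only, and the accents are non-ASCII).
def whole_word_contractions (text : String) : String :=
  let words : List String := ["with", "and", "for", "the"]
  let frEquivs : List String := ["ù", "ç", "é", "à"]
  -- for i, w in enumerate(words): text = text.replace(w, fr_equivs[i])
  let t1 := (PySem.List.enumerate words).foldl
    (fun acc iw => PySem.Str.replace acc iw.2 (PySem.List.pyGetD frEquivs iw.1 "")) text
  -- for i, w in enumerate(words): text = text.replace(w.upper(), fr_equivs[i].upper())
  let t2 := (PySem.List.enumerate ["WITH", "AND", "FOR", "THE"]).foldl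
    (fun acc iw => PySem.Str.replace acc iw.2 (PySem.List.pyGetD ["Ù", "Ç", "É", "À"] iw.1 "")) t1
  -- for i, w in enumerate(words): text = text.replace(w.capitalize(), fr_equivs[i].upper())
  let t3 := (PySem.List.enumerate ["With", "And", "For", "The"]).foldl
    (fun acc iw => PySem.Str.replace acc iw.2 (PySem.List.pyGetD ["Ù", "Ç", "É", "À"] iw.1 "")) t2
  t3

-- ===== PORT B =====
def pvTabLow : List (List Char × List Char) :=
  [("with".toList, "ù".toList), ("and".toList, "ç".toList),
   ("for".toList, "é".toList), ("the".toList, "à".toList)]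
def pvTabUp : List (List Char × List Char) :=
  [("WITH".toList, "Ù".toList), ("AND".toList, "Ç".toList),
   ("FOR".toList, "É".toList), ("THE".toList, "À".toList)]
def pvTabCap : List (List Char × List Char) :=
  [("With".toList, "Ù".toList), ("And".toList, "Ç".toList),
   ("For".toList, "É".toList), ("The".toList, "À".toList)]

-- Source B's for/else over the table: first (tok, rep) whose tok starts at the current position
def pvFindTok (table : List (List Char × List Char)) (s : List Char) :
    Option (List Char × List Char) :=
  table.findSome? (fun p => if p.1.isPrefixOf s then some p else none)

-- Source B's while-loop over index i, as recursion on the remaining suffix.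
-- 'max 1' only guards termination: the tables contain no empty token
-- (Python itself would loop forever on one).
def pvScan (table : List (List Char × List Char)) : List Char → List Char
  | [] => []
  | c :: t =>
    match pvFindTok table (c :: t) with
    | some (tok, rep) => rep ++ pvScan table (List.drop (max 1 tok.length) (c :: t))
    | none => c :: pvScan table t
  termination_by s => s.length
  decreasing_by
    · simp only [List.length_drop, List.length_cons]; omega
    · simp

def whole_word_contractions_alt (text : String) : String :=
  let t1 := String.ofList (pvScan pvTabLow text.toList)
  let t2 := String.ofList (pvScan pvTabUp t1.toList)
  String.ofList (pvScan pvTabCap t2.toList)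

-- ===== PRECONDITION & SPEC =====
def Spec_whole_word_contractions (text : String) (out : String) : Prop := out = whole_word_contractions_alt text
instance (text : String) (out : String) : Decidable (Spec_whole_word_contractions text out) := by unfold Spec_whole_word_contractions; infer_instance

-- ===== CLAIM (what is proved, stated in full; the proofs are below) =====
def Claim_equal_whole_word_contractions : Prop := ∀ (text : String), Dom_whole_word_contractions text → Spec_whole_word_contractions text (whole_word_contractions text)

-- ===== LEMMAS AND PROOFS =====

-- one-step unfolding of PySem.Chars.replace.go
lemma go_succ_cons (old new : List Char) (f : Nat) (c : Char) (t acc : List Char) :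
    PySem.Chars.replace.go old new (f+1) (c::t) acc
      = if old.isPrefixOf (c::t) then
          PySem.Chars.replace.go old new f (List.drop old.length (c::t)) (new.reverse ++ acc)
        else PySem.Chars.replace.go old new f t (c::acc) := by
  rw [PySem.Chars.replace.go]

-- go ignores surplus fuel and accumulates on the left
lemma go_fuel (old new : List Char) (hold : old ≠ []) :
    ∀ fuel l acc, l.length ≤ fuel →
      PySem.Chars.replace.go old new fuel l acc
        = acc.reverse ++ PySem.Chars.replace.go old new l.length l [] := by
  have ho : 1 ≤ old.length := by have := List.length_pos_iff.mpr hold; omega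
  intro fuel
  induction fuel using Nat.strong_induction_on with
  | _ fuel ih =>
    intro l acc hl
    match fuel, l with
    | 0, l =>
      have : l = [] := List.eq_nil_of_length_eq_zero (Nat.le_zero.mp hl)
      subst this
      simp [PySem.Chars.replace.go]
    | f+1, [] => simp [PySem.Chars.replace.go]
    | f+1, c::t =>
      have hl' : t.length ≤ f := by simpa using hl
      have hlen : (List.drop old.length (c::t)).length ≤ t.length := by
        simp only [List.length_drop, List.length_cons]; omega
      simp only [List.length_cons]
      rw [go_succ_cons, go_succ_cons]
      by_cases h : old.isPrefixOf (c::t)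
      · simp only [h, if_true]
        rw [ih f (by omega) _ _ (le_trans hlen hl'),
            ih t.length (by omega) _ _ hlen]
        simp
      · simp only [h]
        rw [ih f (by omega) t _ hl', ih t.length (by omega) t [c] (le_refl _)]
        simp

lemma replace_go_def (old new l : List Char) (hold : old ≠ []) :
    PySem.Chars.replace l old new = PySem.Chars.replace.go old new l.length l [] := by
  rw [PySem.Chars.replace]
  simp [List.isEmpty_iff, hold]

-- the step laws of Python's str.replace (leftmost, non-overlapping)
@[simp] lemma replace_nil (old new : List Char) (hold : old ≠ []) :
    PySem.Chars.replace [] old new = [] := by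
  rw [replace_go_def _ _ _ hold]; simp [PySem.Chars.replace.go]

@[simp] lemma replace_cons (old new : List Char) (c : Char) (t : List Char) (hold : old ≠ []) :
    PySem.Chars.replace (c::t) old new
      = if old.isPrefixOf (c::t) then
          new ++ PySem.Chars.replace (List.drop old.length (c::t)) old new
        else c :: PySem.Chars.replace t old new := by
  have ho : 1 ≤ old.length := by have := List.length_pos_iff.mpr hold; omega
  have hlen : (List.drop old.length (c::t)).length ≤ t.length := by
    simp only [List.length_drop, List.length_cons]; omega
  by_cases h : old.isPrefixOf (c::t)
  · rw [if_pos h, replace_go_def old new (c::t) hold, replace_go_def old new _ hold]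
    simp only [List.length_cons]
    rw [go_succ_cons]
    simp only [h, if_true]
    rw [go_fuel old new hold t.length _ _ hlen]
    simp
  · rw [if_neg h, replace_go_def old new (c::t) hold, replace_go_def old new t hold]
    simp only [List.length_cons]
    rw [go_succ_cons]
    simp only [h, Bool.false_eq_true, if_false]
    rw [go_fuel old new hold t.length t [c] (le_refl _)]
    simp

-- replacing a token by a single char that q avoids cannot create a q-prefix
lemma prefix_replace (old : List Char) (ch : Char) (hold : old ≠ []) :
    ∀ (n : Nat) (t q : List Char), t.length ≤ n → ch ∉ q →
      q.isPrefixOf (PySem.Chars.replace t old [ch]) → q.isPrefixOf t := by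
  intro n
  induction n with
  | zero =>
    intro t q ht _ hq
    have : t = [] := List.eq_nil_of_length_eq_zero (Nat.le_zero.mp ht)
    subst this
    rw [replace_nil _ _ hold] at hq
    cases q with
    | nil => simp
    | cons q0 q' => simp [List.isPrefixOf] at hq
  | succ n ihn =>
    intro t q ht hch hq
    cases t with
    | nil =>
      rw [replace_nil _ _ hold] at hq
      cases q with
      | nil => simp
      | cons q0 q' => simp [List.isPrefixOf] at hq
    | cons c u =>
      rw [replace_cons _ _ _ _ hold] at hq
      by_cases h : old.isPrefixOf (c::u)
      · simp only [h, if_true] at hq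
        cases q with
        | nil => simp
        | cons q0 q' =>
          simp only [List.cons_append, List.nil_append, List.isPrefixOf, Bool.and_eq_true,
            beq_iff_eq] at hq
          exact absurd (hq.1 ▸ List.mem_cons_self) hch
      · simp only [h, Bool.false_eq_true, if_false] at hq
        cases q with
        | nil => simp
        | cons q0 q' =>
          simp only [List.isPrefixOf, Bool.and_eq_true, beq_iff_eq] at hq ⊢
          refine ⟨hq.1, ihn u q' (by simp at ht; omega) (fun hm => hch (List.mem_cons_of_mem _ hm)) hq.2⟩

lemma prefix_cons_replace (old : List Char) (ch : Char) (hold : old ≠ []) (c0 c : Char)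
    (q t : List Char) (hch : ch ∉ q)
    (h : (c0::q).isPrefixOf (c :: PySem.Chars.replace t old [ch])) :
    (c0::q).isPrefixOf (c::t) := by
  simp only [List.isPrefixOf, Bool.and_eq_true, beq_iff_eq] at h ⊢
  exact ⟨h.1, prefix_replace old ch hold _ t q le_rfl hch h.2⟩

-- the lower-case family: one table scan = the four sequential replaces
lemma passLow : ∀ s, pvScan pvTabLow s
    = PySem.Chars.replace (PySem.Chars.replace (PySem.Chars.replace
        (PySem.Chars.replace s "with".toList "ù".toList)
        "and".toList "ç".toList) "for".toList "é".toList) "the".toList "à".toList := by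
  suffices H : ∀ n s, s.length ≤ n → pvScan pvTabLow s
      = PySem.Chars.replace (PySem.Chars.replace (PySem.Chars.replace
          (PySem.Chars.replace s "with".toList "ù".toList)
          "and".toList "ç".toList) "for".toList "é".toList) "the".toList "à".toList by
    intro s; exact H s.length s le_rfl
  intro n
  induction n with
  | zero =>
    intro s hs
    have : s = [] := List.eq_nil_of_length_eq_zero (Nat.le_zero.mp hs)
    subst this
    simp [pvScan]
  | succ n ih =>
    intro s hs
    by_cases h1 : "with".toList.isPrefixOf s
    · obtain ⟨u, rfl⟩ := List.isPrefixOf_iff_prefix.mp h1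
      have hu : u.length ≤ n := by
        simp only [List.length_append, show "with".toList = ['w','i','t','h'] from rfl,
          List.length_cons, List.length_nil] at hs
        omega
      simpa [pvScan, pvFindTok, pvTabLow, List.isPrefixOf] using ih u hu
    · by_cases h2 : "and".toList.isPrefixOf s
      · obtain ⟨u, rfl⟩ := List.isPrefixOf_iff_prefix.mp h2
        have hu : u.length ≤ n := by
          simp only [List.length_append, show "and".toList = ['a','n','d'] from rfl,
            List.length_cons, List.length_nil] at hs
          omega
        simpa [pvScan, pvFindTok, pvTabLow, List.isPrefixOf] using ih u hu
      · by_cases h3 : "for".toList.isPrefixOf s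
        · obtain ⟨u, rfl⟩ := List.isPrefixOf_iff_prefix.mp h3
          have hu : u.length ≤ n := by
            simp only [List.length_append, show "for".toList = ['f','o','r'] from rfl,
              List.length_cons, List.length_nil] at hs
            omega
          simpa [pvScan, pvFindTok, pvTabLow, List.isPrefixOf] using ih u hu
        · by_cases h4 : "the".toList.isPrefixOf s
          · obtain ⟨u, rfl⟩ := List.isPrefixOf_iff_prefix.mp h4
            have hu : u.length ≤ n := by
              simp only [List.length_append, show "the".toList = ['t','h','e'] from rfl,
                List.length_cons, List.length_nil] at hs
              omega
            simpa [pvScan, pvFindTok, pvTabLow, List.isPrefixOf] using ih u hu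
          · cases s with
            | nil => simp [pvScan]
            | cons c t =>
              have ht : t.length ≤ n := by simp at hs; omega
              have h2' : ¬ ("and".toList.isPrefixOf
                  (c :: PySem.Chars.replace t "with".toList "ù".toList)) :=
                fun hp => h2 (prefix_cons_replace "with".toList 'ù' (by decide) _ _ _ _
                  (by decide) hp)
              have h3' : ¬ ("for".toList.isPrefixOf
                  (c :: PySem.Chars.replace (PySem.Chars.replace t "with".toList "ù".toList)
                    "and".toList "ç".toList)) :=
                fun hp => h3 (prefix_cons_replace "with".toList 'ù' (by decide) _ _ _ _
                  (by decide)
                  (prefix_cons_replace "and".toList 'ç' (by decide) _ _ _ _ (by decide) hp))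
              have h4' : ¬ ("the".toList.isPrefixOf
                  (c :: PySem.Chars.replace (PySem.Chars.replace
                    (PySem.Chars.replace t "with".toList "ù".toList)
                    "and".toList "ç".toList) "for".toList "é".toList)) :=
                fun hp => h4 (prefix_cons_replace "with".toList 'ù' (by decide) _ _ _ _
                  (by decide)
                  (prefix_cons_replace "and".toList 'ç' (by decide) _ _ _ _ (by decide)
                    (prefix_cons_replace "for".toList 'é' (by decide) _ _ _ _ (by decide) hp)))
              have hnone : pvFindTok pvTabLow (c::t) = none := by
                simp [pvFindTok, pvTabLow]
                refine ⟨fun he hp => h1 ?_, fun he hp => h2 ?_, fun he hp => h3 ?_,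
                  fun he hp => h4 ?_⟩ <;>
                  (subst he;
                   exact List.isPrefixOf_iff_prefix.mpr (List.cons_prefix_cons.mpr ⟨rfl, hp⟩))
              have r1 : PySem.Chars.replace (c::t) "with".toList "ù".toList
                  = c :: PySem.Chars.replace t "with".toList "ù".toList := by
                rw [replace_cons _ _ _ _ (by decide), if_neg h1]
              have r2 : PySem.Chars.replace
                    (c :: PySem.Chars.replace t "with".toList "ù".toList)
                    "and".toList "ç".toList
                  = c :: PySem.Chars.replace (PySem.Chars.replace t "with".toList "ù".toList)
                      "and".toList "ç".toList := by
                rw [replace_cons _ _ _ _ (by decide), if_neg h2']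
              have r3 : PySem.Chars.replace
                    (c :: PySem.Chars.replace (PySem.Chars.replace t "with".toList "ù".toList)
                      "and".toList "ç".toList) "for".toList "é".toList
                  = c :: PySem.Chars.replace (PySem.Chars.replace
                      (PySem.Chars.replace t "with".toList "ù".toList)
                      "and".toList "ç".toList) "for".toList "é".toList := by
                rw [replace_cons _ _ _ _ (by decide), if_neg h3']
              have r4 : PySem.Chars.replace
                    (c :: PySem.Chars.replace (PySem.Chars.replace
                      (PySem.Chars.replace t "with".toList "ù".toList)
                      "and".toList "ç".toList) "for".toList "é".toList)
                    "the".toList "à".toList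
                  = c :: PySem.Chars.replace (PySem.Chars.replace (PySem.Chars.replace
                      (PySem.Chars.replace t "with".toList "ù".toList)
                      "and".toList "ç".toList) "for".toList "é".toList)
                      "the".toList "à".toList := by
                rw [replace_cons _ _ _ _ (by decide), if_neg h4']
              rw [r1, r2, r3, r4, pvScan, hnone]
              exact congrArg (c :: ·) (ih t ht)

-- the upper-case family
lemma passUp : ∀ s, pvScan pvTabUp s
    = PySem.Chars.replace (PySem.Chars.replace (PySem.Chars.replace
        (PySem.Chars.replace s "WITH".toList "Ù".toList)
        "AND".toList "Ç".toList) "FOR".toList "É".toList) "THE".toList "À".toList := by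
  suffices H : ∀ n s, s.length ≤ n → pvScan pvTabUp s
      = PySem.Chars.replace (PySem.Chars.replace (PySem.Chars.replace
          (PySem.Chars.replace s "WITH".toList "Ù".toList)
          "AND".toList "Ç".toList) "FOR".toList "É".toList) "THE".toList "À".toList by
    intro s; exact H s.length s le_rfl
  intro n
  induction n with
  | zero =>
    intro s hs
    have : s = [] := List.eq_nil_of_length_eq_zero (Nat.le_zero.mp hs)
    subst this
    simp [pvScan]
  | succ n ih =>
    intro s hs
    by_cases h1 : "WITH".toList.isPrefixOf s
    · obtain ⟨u, rfl⟩ := List.isPrefixOf_iff_prefix.mp h1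
      have hu : u.length ≤ n := by
        simp only [List.length_append, show "WITH".toList = ['W','I','T','H'] from rfl,
          List.length_cons, List.length_nil] at hs
        omega
      simpa [pvScan, pvFindTok, pvTabUp, List.isPrefixOf] using ih u hu
    · by_cases h2 : "AND".toList.isPrefixOf s
      · obtain ⟨u, rfl⟩ := List.isPrefixOf_iff_prefix.mp h2
        have hu : u.length ≤ n := by
          simp only [List.length_append, show "AND".toList = ['A','N','D'] from rfl,
            List.length_cons, List.length_nil] at hs
          omega
        simpa [pvScan, pvFindTok, pvTabUp, List.isPrefixOf] using ih u hu
      · by_cases h3 : "FOR".toList.isPrefixOf s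
        · obtain ⟨u, rfl⟩ := List.isPrefixOf_iff_prefix.mp h3
          have hu : u.length ≤ n := by
            simp only [List.length_append, show "FOR".toList = ['F','O','R'] from rfl,
              List.length_cons, List.length_nil] at hs
            omega
          simpa [pvScan, pvFindTok, pvTabUp, List.isPrefixOf] using ih u hu
        · by_cases h4 : "THE".toList.isPrefixOf s
          · obtain ⟨u, rfl⟩ := List.isPrefixOf_iff_prefix.mp h4
            have hu : u.length ≤ n := by
              simp only [List.length_append, show "THE".toList = ['T','H','E'] from rfl,
                List.length_cons, List.length_nil] at hs
              omega
            simpa [pvScan, pvFindTok, pvTabUp, List.isPrefixOf] using ih u hu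
          · cases s with
            | nil => simp [pvScan]
            | cons c t =>
              have ht : t.length ≤ n := by simp at hs; omega
              have h2' : ¬ ("AND".toList.isPrefixOf
                  (c :: PySem.Chars.replace t "WITH".toList "Ù".toList)) :=
                fun hp => h2 (prefix_cons_replace "WITH".toList 'Ù' (by decide) _ _ _ _
                  (by decide) hp)
              have h3' : ¬ ("FOR".toList.isPrefixOf
                  (c :: PySem.Chars.replace (PySem.Chars.replace t "WITH".toList "Ù".toList)
                    "AND".toList "Ç".toList)) :=
                fun hp => h3 (prefix_cons_replace "WITH".toList 'Ù' (by decide) _ _ _ _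
                  (by decide)
                  (prefix_cons_replace "AND".toList 'Ç' (by decide) _ _ _ _ (by decide) hp))
              have h4' : ¬ ("THE".toList.isPrefixOf
                  (c :: PySem.Chars.replace (PySem.Chars.replace
                    (PySem.Chars.replace t "WITH".toList "Ù".toList)
                    "AND".toList "Ç".toList) "FOR".toList "É".toList)) :=
                fun hp => h4 (prefix_cons_replace "WITH".toList 'Ù' (by decide) _ _ _ _
                  (by decide)
                  (prefix_cons_replace "AND".toList 'Ç' (by decide) _ _ _ _ (by decide)
                    (prefix_cons_replace "FOR".toList 'É' (by decide) _ _ _ _ (by decide) hp)))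
              have hnone : pvFindTok pvTabUp (c::t) = none := by
                simp [pvFindTok, pvTabUp]
                refine ⟨fun he hp => h1 ?_, fun he hp => h2 ?_, fun he hp => h3 ?_,
                  fun he hp => h4 ?_⟩ <;>
                  (subst he;
                   exact List.isPrefixOf_iff_prefix.mpr (List.cons_prefix_cons.mpr ⟨rfl, hp⟩))
              have r1 : PySem.Chars.replace (c::t) "WITH".toList "Ù".toList
                  = c :: PySem.Chars.replace t "WITH".toList "Ù".toList := by
                rw [replace_cons _ _ _ _ (by decide), if_neg h1]
              have r2 : PySem.Chars.replace
                    (c :: PySem.Chars.replace t "WITH".toList "Ù".toList)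
                    "AND".toList "Ç".toList
                  = c :: PySem.Chars.replace (PySem.Chars.replace t "WITH".toList "Ù".toList)
                      "AND".toList "Ç".toList := by
                rw [replace_cons _ _ _ _ (by decide), if_neg h2']
              have r3 : PySem.Chars.replace
                    (c :: PySem.Chars.replace (PySem.Chars.replace t "WITH".toList "Ù".toList)
                      "AND".toList "Ç".toList) "FOR".toList "É".toList
                  = c :: PySem.Chars.replace (PySem.Chars.replace
                      (PySem.Chars.replace t "WITH".toList "Ù".toList)
                      "AND".toList "Ç".toList) "FOR".toList "É".toList := by
                rw [replace_cons _ _ _ _ (by decide), if_neg h3']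
              have r4 : PySem.Chars.replace
                    (c :: PySem.Chars.replace (PySem.Chars.replace
                      (PySem.Chars.replace t "WITH".toList "Ù".toList)
                      "AND".toList "Ç".toList) "FOR".toList "É".toList)
                    "THE".toList "À".toList
                  = c :: PySem.Chars.replace (PySem.Chars.replace (PySem.Chars.replace
                      (PySem.Chars.replace t "WITH".toList "Ù".toList)
                      "AND".toList "Ç".toList) "FOR".toList "É".toList)
                      "THE".toList "À".toList := by
                rw [replace_cons _ _ _ _ (by decide), if_neg h4']
              rw [r1, r2, r3, r4, pvScan, hnone]
              exact congrArg (c :: ·) (ih t ht)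

-- the capitalized family
lemma passCap : ∀ s, pvScan pvTabCap s
    = PySem.Chars.replace (PySem.Chars.replace (PySem.Chars.replace
        (PySem.Chars.replace s "With".toList "Ù".toList)
        "And".toList "Ç".toList) "For".toList "É".toList) "The".toList "À".toList := by
  suffices H : ∀ n s, s.length ≤ n → pvScan pvTabCap s
      = PySem.Chars.replace (PySem.Chars.replace (PySem.Chars.replace
          (PySem.Chars.replace s "With".toList "Ù".toList)
          "And".toList "Ç".toList) "For".toList "É".toList) "The".toList "À".toList by
    intro s; exact H s.length s le_rfl
  intro n
  induction n with
  | zero =>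
    intro s hs
    have : s = [] := List.eq_nil_of_length_eq_zero (Nat.le_zero.mp hs)
    subst this
    simp [pvScan]
  | succ n ih =>
    intro s hs
    by_cases h1 : "With".toList.isPrefixOf s
    · obtain ⟨u, rfl⟩ := List.isPrefixOf_iff_prefix.mp h1
      have hu : u.length ≤ n := by
        simp only [List.length_append, show "With".toList = ['W','i','t','h'] from rfl,
          List.length_cons, List.length_nil] at hs
        omega
      simpa [pvScan, pvFindTok, pvTabCap, List.isPrefixOf] using ih u hu
    · by_cases h2 : "And".toList.isPrefixOf s
      · obtain ⟨u, rfl⟩ := List.isPrefixOf_iff_prefix.mp h2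
        have hu : u.length ≤ n := by
          simp only [List.length_append, show "And".toList = ['A','n','d'] from rfl,
            List.length_cons, List.length_nil] at hs
          omega
        simpa [pvScan, pvFindTok, pvTabCap, List.isPrefixOf] using ih u hu
      · by_cases h3 : "For".toList.isPrefixOf s
        · obtain ⟨u, rfl⟩ := List.isPrefixOf_iff_prefix.mp h3
          have hu : u.length ≤ n := by
            simp only [List.length_append, show "For".toList = ['F','o','r'] from rfl,
              List.length_cons, List.length_nil] at hs
            omega
          simpa [pvScan, pvFindTok, pvTabCap, List.isPrefixOf] using ih u hu
        · by_cases h4 : "The".toList.isPrefixOf s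
          · obtain ⟨u, rfl⟩ := List.isPrefixOf_iff_prefix.mp h4
            have hu : u.length ≤ n := by
              simp only [List.length_append, show "The".toList = ['T','h','e'] from rfl,
                List.length_cons, List.length_nil] at hs
              omega
            simpa [pvScan, pvFindTok, pvTabCap, List.isPrefixOf] using ih u hu
          · cases s with
            | nil => simp [pvScan]
            | cons c t =>
              have ht : t.length ≤ n := by simp at hs; omega
              have h2' : ¬ ("And".toList.isPrefixOf
                  (c :: PySem.Chars.replace t "With".toList "Ù".toList)) :=
                fun hp => h2 (prefix_cons_replace "With".toList 'Ù' (by decide) _ _ _ _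
                  (by decide) hp)
              have h3' : ¬ ("For".toList.isPrefixOf
                  (c :: PySem.Chars.replace (PySem.Chars.replace t "With".toList "Ù".toList)
                    "And".toList "Ç".toList)) :=
                fun hp => h3 (prefix_cons_replace "With".toList 'Ù' (by decide) _ _ _ _
                  (by decide)
                  (prefix_cons_replace "And".toList 'Ç' (by decide) _ _ _ _ (by decide) hp))
              have h4' : ¬ ("The".toList.isPrefixOf
                  (c :: PySem.Chars.replace (PySem.Chars.replace
                    (PySem.Chars.replace t "With".toList "Ù".toList)
                    "And".toList "Ç".toList) "For".toList "É".toList)) :=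
                fun hp => h4 (prefix_cons_replace "With".toList 'Ù' (by decide) _ _ _ _
                  (by decide)
                  (prefix_cons_replace "And".toList 'Ç' (by decide) _ _ _ _ (by decide)
                    (prefix_cons_replace "For".toList 'É' (by decide) _ _ _ _ (by decide) hp)))
              have hnone : pvFindTok pvTabCap (c::t) = none := by
                simp [pvFindTok, pvTabCap]
                refine ⟨fun he hp => h1 ?_, fun he hp => h2 ?_, fun he hp => h3 ?_,
                  fun he hp => h4 ?_⟩ <;>
                  (subst he;
                   exact List.isPrefixOf_iff_prefix.mpr (List.cons_prefix_cons.mpr ⟨rfl, hp⟩))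
              have r1 : PySem.Chars.replace (c::t) "With".toList "Ù".toList
                  = c :: PySem.Chars.replace t "With".toList "Ù".toList := by
                rw [replace_cons _ _ _ _ (by decide), if_neg h1]
              have r2 : PySem.Chars.replace
                    (c :: PySem.Chars.replace t "With".toList "Ù".toList)
                    "And".toList "Ç".toList
                  = c :: PySem.Chars.replace (PySem.Chars.replace t "With".toList "Ù".toList)
                      "And".toList "Ç".toList := by
                rw [replace_cons _ _ _ _ (by decide), if_neg h2']
              have r3 : PySem.Chars.replace
                    (c :: PySem.Chars.replace (PySem.Chars.replace t "With".toList "Ù".toList)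
                      "And".toList "Ç".toList) "For".toList "É".toList
                  = c :: PySem.Chars.replace (PySem.Chars.replace
                      (PySem.Chars.replace t "With".toList "Ù".toList)
                      "And".toList "Ç".toList) "For".toList "É".toList := by
                rw [replace_cons _ _ _ _ (by decide), if_neg h3']
              have r4 : PySem.Chars.replace
                    (c :: PySem.Chars.replace (PySem.Chars.replace
                      (PySem.Chars.replace t "With".toList "Ù".toList)
                      "And".toList "Ç".toList) "For".toList "É".toList)
                    "The".toList "À".toList
                  = c :: PySem.Chars.replace (PySem.Chars.replace (PySem.Chars.replace
                      (PySem.Chars.replace t "With".toList "Ù".toList)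
                      "And".toList "Ç".toList) "For".toList "É".toList)
                      "The".toList "À".toList := by
                rw [replace_cons _ _ _ _ (by decide), if_neg h4']
              rw [r1, r2, r3, r4, pvScan, hnone]
              exact congrArg (c :: ·) (ih t ht)

-- B unfolded to the three list-level scans
lemma altEq (text : String) : whole_word_contractions_alt text
    = String.ofList (pvScan pvTabCap (pvScan pvTabUp (pvScan pvTabLow text.toList))) := by
  simp [whole_word_contractions_alt, String.toList_ofList]

-- ===== VERDICT (by name: the statement is the Claim_ definition above) =====
theorem whole_word_contractions_spec : Claim_equal_whole_word_contractions := by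
  intro text _
  unfold Spec_whole_word_contractions
  rw [altEq, passCap, passUp, passLow]
  simp [whole_word_contractions, PySem.Str.replace, String.toList_ofList,
    PySem.List.enumerate, PySem.List.pyGetD]
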